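-- pv_equiv track=rewrite | github.com/aleksanderujek/TSP | utilities/formatFile.py | formatString
-- ===== SOURCE A (Python) =====
-- from typing import List
--
-- def formatString(string: str) -> (List[List[int]], int):
--   lines = string.split('\n')
--   numberOfNodes = int(lines.pop(0))
--   nodes = []
--   for i, line in enumerate(lines):
--     elements = line.split(' ')
--     elements.pop()
--     nodes.append(elements)
--     for j, element in enumerate(elements):
--       if i != j:
--         nodes[j].append(element)
--   nodes = [list(map(int, x)) for x in nodes]
--   return nodes, numberOfNodes
-- ===== SOURCE B (Python) =====
-- def formatString(string):
--     lines = string.split('\n')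
--     numberOfNodes = int(lines[0])
--     tri = [line.split(' ')[:-1] for line in lines[1:]]
--     nodes = []
--     for j, row in enumerate(tri):
--         full = row + [r[j] for r in tri[j + 1:] if j < len(r)]
--         nodes.append([int(x) for x in full])
--     return nodes, numberOfNodes
-- ===== Notes on version B (the rewrite author's own statement) =====
-- stated objective: alternative
-- what changed: B replaces A's mutate-earlier-rows-while-iterating loop (appending each new row's entries onto previously built rows in place) with a parse-then-assemble decomposition: it first builds the triangular list of string rows, then constructs each output row independently as its own triangle row extended with the matching column entry of every later row.
import Mathlib
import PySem

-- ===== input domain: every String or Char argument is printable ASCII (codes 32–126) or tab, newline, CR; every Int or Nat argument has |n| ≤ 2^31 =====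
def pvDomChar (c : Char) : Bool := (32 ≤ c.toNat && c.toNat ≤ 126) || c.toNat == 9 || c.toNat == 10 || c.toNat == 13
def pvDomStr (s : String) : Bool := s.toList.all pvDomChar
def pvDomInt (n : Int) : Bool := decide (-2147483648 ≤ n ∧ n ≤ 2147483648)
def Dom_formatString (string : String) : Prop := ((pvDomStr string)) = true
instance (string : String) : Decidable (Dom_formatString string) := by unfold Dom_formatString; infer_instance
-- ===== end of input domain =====

-- B re-implements the parse as parse-then-assemble over the triangle (alternative decomposition, no in-place
-- mutation of earlier rows); equal return value on Pre_ (A mutates only locals, no observable side effects).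

-- ===== PORT A =====
-- Option state models Python exceptions: none = the loop raised (IndexError on nodes[j]).
def pvInnerA (i : Int) (st : Option (List (List String))) (je : Int × String) :
    Option (List (List String)) :=
  st.bind fun nodes =>
    if i ≠ je.1 then
      (if 0 ≤ je.1 ∧ je.1 < (nodes.length : Int) then
        some (nodes.set je.1.toNat (nodes.getD je.1.toNat [] ++ [je.2]))
      else none)
    else some nodes

def pvOuterA (st : Option (List (List String))) (il : Int × String) :
    Option (List (List String)) :=
  st.bind fun nodes =>
    match PySem.List.pop? ((PySem.Str.split? il.2 " ").getD []) (-1) with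
    | none => none
    | some (_, elements) =>
      (PySem.List.enumerate elements 0).foldl (pvInnerA il.1) (some (nodes ++ [elements]))

def formatString (string : String) : List (List Int) × Int :=
  let lines := (PySem.Str.split? string "\n").getD []
  match PySem.List.pop? lines 0 with
  | none => ([], 0)
  | some (first, rest) =>
    match PySem.Int.ofStr? first with
    | none => ([], 0)
    | some numberOfNodes =>
      match (PySem.List.enumerate rest 0).foldl pvOuterA (some []) with
      | none => ([], 0)
      | some nodes =>
        match nodes.mapM (fun x => x.mapM PySem.Int.ofStr?) with
        | none => ([], 0)
        | some m => (m, numberOfNodes)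

-- ===== PORT B =====
def pvTriOf (line : String) : List String :=
  PySem.List.slice ((PySem.Str.split? line " ").getD []) none (some (-1))

def pvRowB (tri : List (List String)) (j : Int) (row : List String) : List String :=
  row ++ ((PySem.List.slice tri (some (j + 1))).filter
      (fun r => decide (j < (r.length : Int)))).map (fun r => PySem.List.pyGetD r j "")

def formatString_alt (string : String) : List (List Int) × Int :=
  let lines := (PySem.Str.split? string "\n").getD []
  let numberOfNodes := (PySem.Int.ofStr? (PySem.List.pyGetD lines 0 "")).getD 0
  let tri := (PySem.List.slice lines (some 1)).map pvTriOf
  let nodes := (PySem.List.enumerate tri 0).foldl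
    (fun acc je => acc ++ [(pvRowB tri je.1 je.2).map (fun x => (PySem.Int.ofStr? x).getD 0)]) []
  (nodes, numberOfNodes)

-- ===== PRECONDITION & SPEC =====
-- Pre_ excludes exactly the inputs where A raises: first line not an int (ValueError), a data line whose
-- split-and-pop row has more than i+1 entries (IndexError on nodes[j]), or a non-int entry (ValueError).
def Pre_formatString (string : String) : Prop :=
  ((PySem.Int.ofStr? (((PySem.Str.split? string "\n").getD []).getD 0 "")).isSome = true) ∧
  ∀ p ∈ PySem.List.enumerate (((PySem.Str.split? string "\n").getD []).drop 1) 0,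
    ((((PySem.Str.split? p.2 " ").getD []).dropLast.length : Int) ≤ p.1 + 1) ∧
    ∀ e ∈ ((PySem.Str.split? p.2 " ").getD []).dropLast, (PySem.Int.ofStr? e).isSome = true
instance (string : String) : Decidable (Pre_formatString string) := by
  unfold Pre_formatString; infer_instance

def pvWitness_formatString : String := "3\n0 \n5 0 "

def Spec_formatString (string : String) (out : List (List Int) × Int) : Prop :=
  out = formatString_alt string
instance (string : String) (out : List (List Int) × Int) : Decidable (Spec_formatString string out) := by
  unfold Spec_formatString; infer_instance

-- ===== CLAIM (what is proved, stated in full; the proofs are below) =====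
def Claim_equal_formatString : Prop := ∀ (string : String), Dom_formatString string →
  Pre_formatString string → Spec_formatString string (formatString string)

-- ===== LEMMAS AND PROOFS =====

-- the shared "assembled matrix" specification both ports are reduced to
def pvContrib (rows : List (List String)) (j : Nat) : List String :=
  (rows.filter (fun r => decide (j < r.length))).map (fun r => r.getD j "")

-- Python's str.split never returns an empty list
theorem pv_go_ne_nil (sep : List Char) (fuel : Nat) (l cur : List Char) (acc : List (List Char)) :
    PySem.Chars.splitOn.go sep fuel l cur acc ≠ [] := by
  induction fuel generalizing l cur acc with
  | zero => rw [PySem.Chars.splitOn.go.eq_def]; simp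
  | succ n ih =>
    rw [PySem.Chars.splitOn.go.eq_def]
    cases l with
    | nil => simp
    | cons c rest => dsimp only; split <;> apply ih

theorem pv_split_getD_ne_nil (s sep : String) (h : sep.toList ≠ []) :
    (PySem.Str.split? s sep).getD [] ≠ [] := by
  simp [PySem.Str.split?, PySem.Chars.split?, List.isEmpty_iff, h, PySem.Chars.splitOn,
    pv_go_ne_nil]

theorem pv_pop_last (xs : List String) (h : xs ≠ []) :
    PySem.List.pop? xs (-1) = some (xs.getLast h, xs.dropLast) := by
  conv_lhs => rw [← List.dropLast_append_getLast h]
  rw [PySem.List.pop?_last]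

theorem pv_mapM_eq_map {α β : Type} (f : α → Option β) (d : β) (l : List α)
    (h : ∀ e ∈ l, (f e).isSome = true) :
    l.mapM f = some (l.map (fun e => (f e).getD d)) := by
  induction l with
  | nil => rfl
  | cons x xs ih =>
    obtain ⟨v, hv⟩ := Option.isSome_iff_exists.mp (h x (by simp))
    rw [List.mapM_cons, hv, ih (fun e he => h e (by simp [he]))]
    simp [hv]

theorem pv_map_range_getD {α : Type} (xs : List α) (d : α) :
    (List.range xs.length).map (fun j => xs.getD j d) = xs := by
  apply List.ext_getElem (by simp)
  intro k h1 h2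
  simp [List.getD_eq_getElem?_getD, List.getElem?_eq_getElem h2]

theorem pv_enumerate_map {α β : Type} (f : α → β) (xs : List α) (s : Int) :
    PySem.List.enumerate (xs.map f) s = (PySem.List.enumerate xs s).map (fun p => (p.1, f p.2)) := by
  induction xs generalizing s with
  | nil => rfl
  | cons x xs ih => simp [PySem.List.enumerate_cons, ih]

theorem pv_enum_map_range {α β : Type} (g : Int × α → β) (xs : List α) (d : α) :
    (PySem.List.enumerate xs 0).map g =
      (List.range xs.length).map (fun j : Nat => g ((j : Int), xs.getD j d)) := by
  apply List.ext_getElem (by simp [PySem.List.length_enumerate])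
  intro k h1 h2
  have hk : k < xs.length := by simpa [PySem.List.length_enumerate] using h2
  simp [PySem.List.getElem_enumerate, List.getD_eq_getElem?_getD, List.getElem?_eq_getElem hk]

theorem pv_getD_set {α : Type} (xs : List α) (n m : Nat) (v : α) (d : α) (hn : n < xs.length) :
    (xs.set n v).getD m d = if m = n then v else xs.getD m d := by
  rcases eq_or_ne m n with rfl | hne
  · simp [List.getD_eq_getElem?_getD, hn]
  · simp [List.getD_eq_getElem?_getD, List.getElem?_set_ne (Ne.symm hne), hne]

theorem pv_contrib_cons (row : List String) (rs : List (List String)) (j : Nat) :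
    pvContrib (row :: rs) j =
      (if j < row.length then [row.getD j ""] else []) ++ pvContrib rs j := by
  by_cases h : j < row.length <;> simp [pvContrib, h]

-- A's inner loop (the nodes[j].append pass for one data row)
theorem pv_inner_eq (i : Int) (elements : List String) (s : Nat) (nodes : List (List String))
    (h : s + elements.length ≤ nodes.length) :
    (PySem.List.enumerate elements (s : Int)).foldl (pvInnerA i) (some nodes) =
      some ((List.range nodes.length).map (fun j =>
        if s ≤ j ∧ j < s + elements.length ∧ (j : Int) ≠ i
        then nodes.getD j [] ++ [elements.getD (j - s) ""] else nodes.getD j [])) := by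
  induction elements generalizing s nodes with
  | nil =>
    simp only [PySem.List.enumerate_nil, List.foldl_nil, Option.some.injEq, List.length_nil]
    rw [List.map_congr_left (g := fun j => nodes.getD j []) ?_, pv_map_range_getD]
    intro j hj
    rw [if_neg (by omega)]
  | cons e rest ih =>
    simp only [List.length_cons] at h ⊢
    rw [PySem.List.enumerate_cons, List.foldl_cons]
    have hstep : ((s : Int) + 1) = ((s + 1 : Nat) : Int) := by push_cast; ring
    by_cases hi : i = (s : Int)
    · have h1 : pvInnerA i (some nodes) ((s : Int), e) = some nodes := by
        simp [pvInnerA, hi]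
      rw [h1, hstep, ih (s + 1) nodes (by omega)]
      congr 1
      apply List.map_congr_left
      intro j hj
      simp only [List.mem_range] at hj
      rcases Nat.lt_trichotomy j s with hlt | heq | hgt
      · rw [if_neg (by omega), if_neg (by omega)]
      · subst heq
        rw [if_neg (by omega), if_neg (fun hh => hh.2.2 hi.symm)]
      · split_ifs with h1 h2 h3
        · have hj1 : j - s = (j - (s + 1)) + 1 := by omega
          rw [hj1, List.getD_cons_succ]
        · exact absurd ⟨by omega, by omega, h1.2.2⟩ h2
        · exact absurd ⟨by omega, by omega, h3.2.2⟩ h1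
        · rfl
    · have hs : s < nodes.length := by omega
      have h1 : pvInnerA i (some nodes) ((s : Int), e) =
          some (nodes.set s (nodes.getD s [] ++ [e])) := by
        simp only [pvInnerA, Option.bind_some]
        rw [if_pos hi, if_pos ⟨Int.natCast_nonneg s, by exact_mod_cast hs⟩]
        simp
      rw [h1, hstep, ih (s + 1) _ (by simp; omega)]
      congr 1
      rw [List.length_set]
      apply List.map_congr_left
      intro j hj
      simp only [List.mem_range] at hj
      rcases Nat.lt_trichotomy j s with hlt | heq | hgt
      · have hset : (nodes.set s (nodes.getD s [] ++ [e])).getD j [] = nodes.getD j [] := by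
          rw [pv_getD_set _ _ _ _ _ hs, if_neg (by omega)]
        rw [hset, if_neg (by omega), if_neg (by omega)]
      · subst heq
        have hset : (nodes.set j (nodes.getD j [] ++ [e])).getD j [] =
            nodes.getD j [] ++ [e] := by
          rw [pv_getD_set _ _ _ _ _ hs, if_pos rfl]
        rw [hset, if_neg (by omega), if_pos ⟨le_refl j, by omega, fun hh => hi hh.symm⟩]
        simp
      · have hset : (nodes.set s (nodes.getD s [] ++ [e])).getD j [] = nodes.getD j [] := by
          rw [pv_getD_set _ _ _ _ _ hs, if_neg (by omega)]
        rw [hset]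
        split_ifs with h1 h2 h3
        · have hj1 : j - s = (j - (s + 1)) + 1 := by omega
          rw [hj1, List.getD_cons_succ]
        · exact absurd ⟨by omega, by omega, h1.2.2⟩ h2
        · exact absurd ⟨by omega, by omega, h3.2.2⟩ h1
        · rfl

def pvOuterP (st : Option (List (List String))) (ir : Int × List String) :
    Option (List (List String)) :=
  st.bind fun nodes =>
    (PySem.List.enumerate ir.2 0).foldl (pvInnerA ir.1) (some (nodes ++ [ir.2]))

theorem pv_outerA_eq_outerP (st : Option (List (List String))) (il : Int × String) :
    pvOuterA st il = pvOuterP st (il.1, pvTriOf il.2) := by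
  cases st with
  | none => rfl
  | some nodes =>
    have hne := pv_split_getD_ne_nil il.2 " " (by decide)
    have hdl : pvTriOf il.2 = ((PySem.Str.split? il.2 " ").getD []).dropLast := by
      simp [pvTriOf, pysem]
    simp only [pvOuterA, pvOuterP, Option.bind_some, pv_pop_last _ hne, hdl]

-- A's outer loop assembles exactly the row-plus-later-column matrix
theorem pv_outer_eq (rest : List (List String)) (k : Nat) (acc : List (List String))
    (hacc : acc.length = k)
    (hlen : ∀ m : Nat, (hm : m < rest.length) → rest[m].length ≤ k + m + 1) :
    (PySem.List.enumerate rest (k : Int)).foldl pvOuterP (some acc) =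
      some ((List.range (k + rest.length)).map (fun j =>
        (if j < k then acc.getD j [] else rest.getD (j - k) []) ++
          pvContrib (rest.drop (j + 1 - k)) j)) := by
  induction rest generalizing k acc with
  | nil =>
    simp only [PySem.List.enumerate_nil, List.foldl_nil, List.length_nil, Nat.add_zero,
      Option.some.injEq, List.drop_nil]
    subst hacc
    rw [List.map_congr_left (g := fun j => acc.getD j []) ?_, pv_map_range_getD]
    intro j hj
    simp only [List.mem_range] at hj
    rw [if_pos hj]
    simp [pvContrib]
  | cons row rs ih =>
    rw [PySem.List.enumerate_cons, List.foldl_cons]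
    have hrow : row.length ≤ k + 1 := by
      have := hlen 0 (by simp); simpa using this
    have hnodes : (acc ++ [row]).length = k + 1 := by simp [hacc]
    have h1 : pvOuterP (some acc) ((k : Int), row) =
        some ((List.range (k + 1)).map (fun j =>
          if 0 ≤ j ∧ j < 0 + row.length ∧ (j : Int) ≠ (k : Int)
          then (acc ++ [row]).getD j [] ++ [row.getD (j - 0) ""]
          else (acc ++ [row]).getD j [])) := by
      show (PySem.List.enumerate row ((0 : Nat) : Int)).foldl (pvInnerA (k : Int))
          (some (acc ++ [row])) = _
      rw [pv_inner_eq (k : Int) row 0 (acc ++ [row]) (by omega), hnodes]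
    have hstep : ((k : Int) + 1) = ((k + 1 : Nat) : Int) := by push_cast; ring
    rw [h1, hstep, ih (k + 1) _ (by simp) (fun m hm => by
      have := hlen (m + 1) (by simp; omega)
      simp at this; omega)]
    congr 1
    have hr : k + 1 + rs.length = k + (rs.length + 1) := by omega
    rw [hr, show (row :: rs).length = rs.length + 1 from rfl]
    apply List.map_congr_left
    intro j hj
    simp only [List.mem_range] at hj
    rcases Nat.lt_trichotomy j k with hlt | heq | hgt
    · have hgd : (acc ++ [row]).getD j [] = acc.getD j [] :=
        List.getD_append _ _ _ _ (by omega)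
      have hacc' : ((List.range (k + 1)).map (fun j' =>
          if 0 ≤ j' ∧ j' < 0 + row.length ∧ (j' : Int) ≠ (k : Int)
          then (acc ++ [row]).getD j' [] ++ [row.getD (j' - 0) ""]
          else (acc ++ [row]).getD j' [])).getD j [] =
          if j < row.length then acc.getD j [] ++ [row.getD j ""] else acc.getD j [] := by
        rw [PySem.List.getD_map_range _ _ _ _ (by omega)]
        split_ifs with h1 h2 h3
        · rw [hgd, Nat.sub_zero]
        · exact absurd (show j < row.length by omega) h2
        · exact absurd ⟨Nat.zero_le j, by omega, by omega⟩ h1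
        · exact hgd
      rw [if_pos (by omega), if_pos (by omega), hacc',
        show j + 1 - (k + 1) = 0 from by omega, show j + 1 - k = 0 from by omega,
        List.drop_zero, List.drop_zero, pv_contrib_cons]
      split_ifs with h1
      · simp
      · simp
    · have hacc' : ((List.range (k + 1)).map (fun j' =>
          if 0 ≤ j' ∧ j' < 0 + row.length ∧ (j' : Int) ≠ (k : Int)
          then (acc ++ [row]).getD j' [] ++ [row.getD (j' - 0) ""]
          else (acc ++ [row]).getD j' [])).getD j [] = row := by
        rw [PySem.List.getD_map_range _ _ _ _ (by omega)]
        have hcond : ¬(0 ≤ j ∧ j < 0 + row.length ∧ (j : Int) ≠ (k : Int)) :=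
          fun hh => hh.2.2 (by omega)
        rw [if_neg hcond, List.getD_append_right _ _ _ _ (by omega),
          show j - acc.length = 0 from by omega]
        rfl
      rw [if_pos (by omega), if_neg (by omega), hacc',
        show j + 1 - (k + 1) = 0 from by omega, show j + 1 - k = 1 from by omega,
        show j - k = 0 from by omega, List.drop_zero, List.drop_succ_cons, List.drop_zero]
      rfl
    · rw [if_neg (by omega), if_neg (by omega),
        show j + 1 - (k + 1) = j - k from by omega,
        show j + 1 - k = (j - k) + 1 from by omega, List.drop_succ_cons,
        show j - (k + 1) = (j - k) - 1 from by omega,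
        show j - k = ((j - k) - 1) + 1 from by omega, List.getD_cons_succ]
      rw [show (j - k - 1 + 1) = j - k from by omega]

-- ===== VERDICT (by name: the statement is the Claim_ definition above) =====
theorem pv_main (string : String) (hpre : Pre_formatString string) :
    formatString string = formatString_alt string := by
  unfold Pre_formatString at hpre
  rcases hl : (PySem.Str.split? string "\n").getD [] with _ | ⟨l0, rest⟩
  · exact absurd hl (pv_split_getD_ne_nil string "\n" (by decide))
  rw [hl] at hpre
  obtain ⟨hint, hrows⟩ := hpre
  rw [List.getD_cons_zero] at hint
  obtain ⟨n0, hn0⟩ := Option.isSome_iff_exists.mp hint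
  rw [List.drop_succ_cons, List.drop_zero] at hrows
  have hTri : ∀ line, pvTriOf line = ((PySem.Str.split? line " ").getD []).dropLast := by
    intro line; simp [pvTriOf, pysem]
  set tri := rest.map pvTriOf with htri
  -- facts used on both sides
  have hlen' : ∀ m : Nat, (hm : m < tri.length) → tri[m].length ≤ 0 + m + 1 := by
    intro m hm
    have hm' : m < rest.length := by simpa [htri] using hm
    have hmm : m < (PySem.List.enumerate rest 0).length := by
      simpa [PySem.List.length_enumerate] using hm'
    have hmem := List.getElem_mem hmm
    rw [PySem.List.getElem_enumerate, zero_add] at hmem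
    have h2 := (hrows _ hmem).1
    dsimp only at h2
    have htm : tri[m] = pvTriOf rest[m] := by simp [htri]
    rw [htm, hTri]
    omega
  have hparse : ∀ r ∈ tri, ∀ e ∈ r, (PySem.Int.ofStr? e).isSome = true := by
    intro r hr e he
    obtain ⟨line, hline, rfl⟩ := List.mem_map.mp hr
    obtain ⟨m, hm', rfl⟩ := List.getElem_of_mem hline
    have hmm : m < (PySem.List.enumerate rest 0).length := by
      simpa [PySem.List.length_enumerate] using hm'
    have hmem := List.getElem_mem hmm
    rw [PySem.List.getElem_enumerate, zero_add] at hmem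
    have h2 := (hrows _ hmem).2
    dsimp only at h2
    exact h2 e (by rwa [hTri] at he)
  -- A's loop produces the assembled matrix
  have hfoldA : (PySem.List.enumerate rest 0).foldl pvOuterA (some []) =
      some ((List.range tri.length).map (fun j =>
        tri.getD j [] ++ pvContrib (tri.drop (j + 1)) j)) := by
    have hfn : pvOuterA = fun st il => pvOuterP st (il.1, pvTriOf il.2) :=
      funext fun st => funext fun il => pv_outerA_eq_outerP st il
    rw [hfn, show (0 : Int) = ((0 : Nat) : Int) from rfl,
      ← List.foldl_map (f := fun p : Int × String => (p.1, pvTriOf p.2)) (g := pvOuterP),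
      ← pv_enumerate_map, ← htri, pv_outer_eq tri 0 [] rfl hlen']
    simp
  -- the rows of B
  have hrowB : ∀ j, j < tri.length → pvRowB tri (j : Int) (tri.getD j []) =
      tri.getD j [] ++ pvContrib (tri.drop (j + 1)) j := by
    intro j hj
    unfold pvRowB pvContrib
    rw [PySem.List.slice_from _ (by positivity),
      show ((j : Int) + 1).toNat = j + 1 from by omega]
    simp only [Nat.cast_lt, PySem.List.pyGetD_natCast]
  -- assemble both sides
  unfold formatString formatString_alt
  rw [hl]
  simp only [PySem.List.pop?_zero_cons, PySem.List.pyGetD_zero_cons, hn0]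
  rw [PySem.List.slice_from _ (by norm_num), show (1 : Int).toNat = 1 from rfl,
    List.drop_succ_cons, List.drop_zero, ← htri, hfoldA,
    PySem.List.foldl_append_singleton_eq_map
      (f := fun je : Int × List String =>
        (pvRowB tri je.1 je.2).map (fun x => (PySem.Int.ofStr? x).getD 0)),
    pv_enum_map_range _ tri [], List.nil_append]
  have hrows_parse : ∀ j, j < tri.length →
      ∀ e ∈ tri.getD j [] ++ pvContrib (tri.drop (j + 1)) j,
        (PySem.Int.ofStr? e).isSome = true := by
    intro j hj e he
    rcases List.mem_append.mp he with he | he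
    · have hgd : tri.getD j [] = tri[j] := by
        rw [List.getD_eq_getElem?_getD, List.getElem?_eq_getElem hj]; rfl
      exact hparse _ (hgd ▸ List.getElem_mem hj) e (hgd ▸ he)
    · unfold pvContrib at he
      obtain ⟨r, hrf, rfl⟩ := List.mem_map.mp he
      have hrfil := List.mem_filter.mp hrf
      have hrtri : r ∈ tri := List.mem_of_mem_drop hrfil.1
      have hjr : j < r.length := by simpa using hrfil.2
      have : r.getD j "" = r[j] := by
        rw [List.getD_eq_getElem?_getD, List.getElem?_eq_getElem hjr]; rfl
      exact this ▸ hparse r hrtri _ (List.getElem_mem hjr)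
  have hall : ∀ row ∈ (List.range tri.length).map
      (fun j => tri.getD j [] ++ pvContrib (List.drop (j + 1) tri) j),
      (row.mapM PySem.Int.ofStr?).isSome = true := by
    intro row hrow
    obtain ⟨j, hj, rfl⟩ := List.mem_map.mp hrow
    rw [List.mem_range] at hj
    rw [pv_mapM_eq_map _ (0 : Int) _ (hrows_parse j hj)]
    rfl
  dsimp only
  have houter := pv_mapM_eq_map (fun x : List String => List.mapM PySem.Int.ofStr? x)
    ([] : List Int)
    ((List.range tri.length).map (fun j => tri.getD j [] ++ pvContrib (List.drop (j + 1) tri) j))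
    hall
  rw [houter]
  dsimp only [Option.getD_some]
  refine Prod.ext ?_ rfl
  dsimp only
  rw [List.map_map]
  apply List.map_congr_left
  intro j hj
  rw [List.mem_range] at hj
  dsimp only [Function.comp]
  rw [pv_mapM_eq_map _ (0 : Int) _ (hrows_parse j hj), hrowB j hj]
  rfl

theorem formatString_spec : Claim_equal_formatString := by
  unfold Claim_equal_formatString Spec_formatString
  intro string _ hpre
  exact pv_main string hpre
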